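-- pv_equiv track=rewrite | github.com/devsoc-unsw/2025-recruitment-technical-assessment | backend/py_template/devdonalds.py | parse_handwriting
-- ===== SOURCE A (Python) =====
-- from typing import List, Dict, Union
--
-- def parse_handwriting(recipeName: str) -> Union[str | None]:
-- 	goodRecipeName = ''
-- 	t = False
-- 	for cha in recipeName:
-- 		if len(goodRecipeName) != 0:
-- 			lastCha = goodRecipeName[-1]
-- 		else:
-- 			lastCha = 'anything'
-- 		if cha == '-' or cha == '_' or cha == ' ':
-- 			if lastCha != ' ':
-- 				goodRecipeName += ' '
-- 		elif cha.isalpha():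
-- 			if t == False:
-- 				goodRecipeName += cha.upper()
-- 				t = True
-- 			elif lastCha == ' ':
-- 				goodRecipeName += cha.upper()
-- 			else:
-- 				goodRecipeName += cha.lower()
-- 	if len(goodRecipeName) == 0:
-- 		return None
-- 	recipeName = goodRecipeName
-- 	return recipeName
-- ===== SOURCE B (Python) =====
-- def parse_handwriting(recipeName: str):
--     # pipeline: filter to letters/separators, collapse separator runs, title-case
--     kept = [' ' if c in '-_ ' else c for c in recipeName if c.isalpha() or c in '-_ ']
--     squeezed = [c for prev, c in zip([None] + kept, kept) if c != ' ' or prev != ' ']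
--     result = ''.join(squeezed).title()
--     return result if result else None
-- ===== Notes on version B (the rewrite author's own statement) =====
-- stated objective: idiomatic
-- what changed: A's single stateful scan (appending to an accumulator while tracking a first-letter flag and the last appended character) is replaced by a three-stage pipeline: filter to letters/separators mapping separators to spaces, collapse runs of spaces by comparing each kept character with its predecessor, then title-case the result. (pipeline of built-in filter/zip/str.title passes instead of per-character Python branching)
import Mathlib
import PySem

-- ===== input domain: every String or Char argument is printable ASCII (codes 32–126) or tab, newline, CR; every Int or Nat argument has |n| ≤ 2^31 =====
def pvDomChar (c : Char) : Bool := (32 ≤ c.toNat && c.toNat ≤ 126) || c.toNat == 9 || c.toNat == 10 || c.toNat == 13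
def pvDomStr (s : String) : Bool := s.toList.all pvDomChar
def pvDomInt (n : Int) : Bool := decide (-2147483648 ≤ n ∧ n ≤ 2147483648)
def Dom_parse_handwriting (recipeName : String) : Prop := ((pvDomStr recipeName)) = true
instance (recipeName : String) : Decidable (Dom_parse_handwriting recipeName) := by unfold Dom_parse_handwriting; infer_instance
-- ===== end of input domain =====

-- B replaces A's stateful one-pass scan by a filter / collapse-separator-runs / title-case
-- pipeline (objective: idiomatic decomposition; same O(n) cost).


-- ===== PORT A =====
-- One step of A's loop body; state = (goodRecipeName as List Char, t).
-- Python's lastCha is the sentinel string 'anything' when goodRecipeName is empty; it is only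
-- ever compared with ' ', so it is ported as Option Char with none as the sentinel (none ≠ some ' ').
def pvStepA (p : List Char × Bool) (cha : Char) : List Char × Bool :=
  let lastCha : Option Char := p.1.getLast?
  if cha = '-' ∨ cha = '_' ∨ cha = ' ' then
    if lastCha ≠ some ' ' then (p.1 ++ [' '], p.2) else p
  else if PySem.Chars.isalpha cha then
    if p.2 = false then (p.1 ++ [PySem.Chars.upperChar cha], true)
    else if lastCha = some ' ' then (p.1 ++ [PySem.Chars.upperChar cha], p.2)
    else (p.1 ++ [PySem.Chars.lowerChar cha], p.2)
  else p

def parse_handwriting (recipeName : String) : Option String :=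
  let st := recipeName.toList.foldl pvStepA ([], false)
  if st.1.length = 0 then none else some (String.ofList st.1)

-- ===== PORT B =====
def pvSep (c : Char) : Bool := c == '-' || c == '_' || c == ' '

-- the comprehension [' ' if c in '-_ ' else c for c in recipeName if c.isalpha() or c in '-_ ']
def pvKept (cs : List Char) : List Char :=
  (cs.filter (fun c => PySem.Chars.isalpha c || pvSep c)).map (fun c => if pvSep c then ' ' else c)

-- hand port of str.title() over the code points; exact on the ASCII domain, where 'cased' = 'isalpha'.
-- Second argument: whether the previous character was cased.
def pvTitle : List Char → Bool → List Char
  | [], _ => []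
  | c :: rest, prevAlpha =>
    (if PySem.Chars.isalpha c then
       (if prevAlpha then PySem.Chars.lowerChar c else PySem.Chars.upperChar c)
     else c) :: pvTitle rest (PySem.Chars.isalpha c)

def parse_handwriting_alt (recipeName : String) : Option String :=
  let kept := pvKept recipeName.toList
  -- [c for prev, c in zip([None] + kept, kept) if c != ' ' or prev != ' ']
  let squeezed := ((none :: kept.map some).zip kept).filterMap
    (fun pc => if pc.2 ≠ ' ' ∨ pc.1 ≠ some ' ' then some pc.2 else none)
  let result := pvTitle squeezed false
  if result = [] then none else some (String.ofList result)

-- ===== PRECONDITION & SPEC =====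
def Spec_parse_handwriting (recipeName : String) (out : Option String) : Prop := out = parse_handwriting_alt recipeName
instance (recipeName : String) (out : Option String) : Decidable (Spec_parse_handwriting recipeName out) := by unfold Spec_parse_handwriting; infer_instance

-- ===== CLAIM (what is proved, stated in full; the proofs are below) =====
def Claim_equal_parse_handwriting : Prop := ∀ (recipeName : String), Dom_parse_handwriting recipeName → Spec_parse_handwriting recipeName (parse_handwriting recipeName)

-- ===== LEMMAS AND PROOFS =====

-- recursive form of B's zip-with-previous comprehension
def pvSqueezeGo : Option Char → List Char → List Char
  | _, [] => []
  | prev, c :: rest =>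
    if c ≠ ' ' ∨ prev ≠ some ' ' then c :: pvSqueezeGo (some c) rest
    else pvSqueezeGo (some c) rest

lemma pvZipSqueeze (l : List Char) : ∀ prev : Option Char,
    ((prev :: l.map some).zip l).filterMap
      (fun pc => if pc.2 ≠ ' ' ∨ pc.1 ≠ some ' ' then some pc.2 else none)
      = pvSqueezeGo prev l := by
  induction l with
  | nil => intro prev; rfl
  | cons c rest ih =>
    intro prev
    simp only [List.map_cons, List.zip_cons_cons, List.filterMap_cons, pvSqueezeGo]
    split_ifs with h
    · simp [ih (some c)]
    · simp [ih (some c)]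

lemma pvAlpha_ne_space {c : Char} (h : PySem.Chars.isalpha c = true) : c ≠ ' ' := by
  intro hc; subst hc; exact absurd h (by decide)

lemma pvUpper_ne_space {c : Char} (h : PySem.Chars.isalpha c = true) :
    PySem.Chars.upperChar c ≠ ' ' := by
  unfold PySem.Chars.upperChar
  split_ifs with hl
  · simp only [PySem.Chars.islower, Bool.and_eq_true, decide_eq_true_eq, Char.le_def] at hl
    have h1 : ('a' : Char).val.toNat ≤ c.val.toNat := UInt32.le_iff_toNat_le.mp hl.1
    have h2 : c.val.toNat ≤ ('z' : Char).val.toNat := UInt32.le_iff_toNat_le.mp hl.2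
    have ha : ('a' : Char).val.toNat = 97 := rfl
    have hz : ('z' : Char).val.toNat = 122 := rfl
    have hcn : c.toNat = c.val.toNat := rfl
    intro he
    have hv : (Char.ofNat (c.toNat - 32)).toNat = (' ' : Char).toNat := by rw [he]
    rw [Char.toNat_ofNat, if_pos (Or.inl (by omega : c.toNat - 32 < 0xD800))] at hv
    have hs : (' ' : Char).toNat = 32 := rfl
    omega
  · exact pvAlpha_ne_space h

lemma pvLower_ne_space {c : Char} (h : PySem.Chars.isalpha c = true) :
    PySem.Chars.lowerChar c ≠ ' ' := by
  unfold PySem.Chars.lowerChar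
  split_ifs with hu
  · simp only [PySem.Chars.isupper, Bool.and_eq_true, decide_eq_true_eq, Char.le_def] at hu
    have h1 : ('A' : Char).val.toNat ≤ c.val.toNat := UInt32.le_iff_toNat_le.mp hu.1
    have h2 : c.val.toNat ≤ ('Z' : Char).val.toNat := UInt32.le_iff_toNat_le.mp hu.2
    have ha : ('A' : Char).val.toNat = 65 := rfl
    have hz : ('Z' : Char).val.toNat = 90 := rfl
    have hcn : c.toNat = c.val.toNat := rfl
    intro he
    have hv : (Char.ofNat (c.toNat + 32)).toNat = (' ' : Char).toNat := by rw [he]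
    rw [Char.toNat_ofNat, if_pos (Or.inl (by omega : c.toNat + 32 < 0xD800))] at hv
    have hs : (' ' : Char).toNat = 32 := rfl
    omega
  · exact pvAlpha_ne_space h

-- Main invariant: A's fold from state (g,t) produces g ++ B's pipeline tail, whenever
-- (g,t) and B's (prev kept char, title flag) describe the same situation.
lemma pvMain (cs : List Char) : ∀ (g : List Char) (t : Bool) (prev : Option Char) (f : Bool),
    (g.getLast? = some ' ' ↔ prev = some ' ') →
    (g.getLast? = none ↔ prev = none) →
    (f = true ↔ (t = true ∧ prev ≠ some ' ' ∧ prev ≠ none)) →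
    (t = true → prev ≠ none) →
    (List.foldl pvStepA (g, t) cs).1 = g ++ pvTitle (pvSqueezeGo prev (pvKept cs)) f := by
  induction cs with
  | nil => intro g t prev f _ _ _ _; simp [pvKept, pvSqueezeGo, pvTitle]
  | cons c rest ih =>
    intro g t prev f hsp hnone hf ht
    by_cases hsep : c = '-' ∨ c = '_' ∨ c = ' '
    · have hsb : pvSep c = true := by
        rcases hsep with h | h | h <;> simp [pvSep, h]
      have hna : PySem.Chars.isalpha c || pvSep c = true := by simp [hsb]
      have hkept : pvKept (c :: rest) = ' ' :: pvKept rest := by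
        simp [pvKept, hsb]
      by_cases hlast : g.getLast? = some ' '
      · -- last output char is a space: A appends nothing, B drops the duplicate separator
        have hprev : prev = some ' ' := hsp.mp hlast
        have hstep : pvStepA (g, t) c = (g, t) := by
          simp [pvStepA, hsep, hlast]
        have hfFalse : f = false := by
          cases f with
          | false => rfl
          | true => exact absurd (hf.mp rfl).2.1 (by simp [hprev])
        rw [List.foldl_cons, hstep, hkept]
        have : pvSqueezeGo prev (' ' :: pvKept rest) = pvSqueezeGo (some ' ') (pvKept rest) := by
          simp [pvSqueezeGo, hprev]
        rw [this, hfFalse]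
        exact ih g t (some ' ') false (by simp [hlast]) (by simp [hlast])
          (by simp) (fun _ => by simp)
      · -- A appends one space; B keeps this separator as one space
        have hprev : prev ≠ some ' ' := fun h => hlast (hsp.mpr h)
        have hstep : pvStepA (g, t) c = (g ++ [' '], t) := by
          simp [pvStepA, hsep, hlast]
        rw [List.foldl_cons, hstep, hkept]
        have hsq : pvSqueezeGo prev (' ' :: pvKept rest)
            = ' ' :: pvSqueezeGo (some ' ') (pvKept rest) := by
          simp [pvSqueezeGo, hprev]
        rw [hsq]
        have htl : pvTitle (' ' :: pvSqueezeGo (some ' ') (pvKept rest)) f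
            = ' ' :: pvTitle (pvSqueezeGo (some ' ') (pvKept rest)) false := by
          simp [pvTitle, show PySem.Chars.isalpha ' ' = false by decide]
        rw [htl]
        have := ih (g ++ [' ']) t (some ' ') false
          (by simp) (by simp)
          (by simp) (fun _ => by simp)
        rw [this, List.append_assoc]
        rfl
    · by_cases halpha : PySem.Chars.isalpha c = true
      · have hsb : pvSep c = false := by
          simp only [pvSep, Bool.or_eq_false_iff, beq_eq_false_iff_ne]
          exact ⟨⟨fun h => hsep (Or.inl h), fun h => hsep (Or.inr (Or.inl h))⟩,
                 fun h => hsep (Or.inr (Or.inr h))⟩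
        have hkept : pvKept (c :: rest) = c :: pvKept rest := by
          simp [pvKept, halpha, hsb]
        have hcne : c ≠ ' ' := pvAlpha_ne_space halpha
        have hsq : ∀ p : Option Char, pvSqueezeGo p (c :: pvKept rest)
            = c :: pvSqueezeGo (some c) (pvKept rest) := by
          intro p; simp [pvSqueezeGo, hcne]
        -- which casing is applied
        by_cases htf : t = false
        · -- first letter ever: A upper-cases; B's flag is false here, title upper-cases
          have hfFalse : f = false := by
            cases f with
            | false => rfl
            | true => exact absurd (hf.mp rfl).1 (by simp [htf])
          have hstep : pvStepA (g, t) c = (g ++ [PySem.Chars.upperChar c], true) := by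
            simp [pvStepA, hsep, halpha, htf]
          rw [List.foldl_cons, hstep, hkept, hsq, hfFalse]
          have htl : pvTitle (c :: pvSqueezeGo (some c) (pvKept rest)) false
              = PySem.Chars.upperChar c :: pvTitle (pvSqueezeGo (some c) (pvKept rest)) true := by
            simp [pvTitle, halpha]
          rw [htl]
          have := ih (g ++ [PySem.Chars.upperChar c]) true (some c) true
            (by simp [pvUpper_ne_space halpha, hcne])
            (by simp)
            (by simp [hcne]) (fun _ => by simp)
          rw [this, List.append_assoc]
          rfl
        · have htT : t = true := by revert htf; cases t <;> simp
          by_cases hlast : g.getLast? = some ' '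
          · -- letter after a space: both upper-case
            have hprev : prev = some ' ' := hsp.mp hlast
            have hfFalse : f = false := by
              cases f with
              | false => rfl
              | true => exact absurd (hf.mp rfl).2.1 (by simp [hprev])
            have hstep : pvStepA (g, t) c = (g ++ [PySem.Chars.upperChar c], t) := by
              simp [pvStepA, hsep, halpha, htT, hlast]
            rw [List.foldl_cons, hstep, hkept, hsq, hfFalse]
            have htl : pvTitle (c :: pvSqueezeGo (some c) (pvKept rest)) false
                = PySem.Chars.upperChar c :: pvTitle (pvSqueezeGo (some c) (pvKept rest)) true := by
              simp [pvTitle, halpha]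
            rw [htl]
            have := ih (g ++ [PySem.Chars.upperChar c]) t (some c) true
              (by simp [pvUpper_ne_space halpha, hcne])
              (by simp)
              (by simp [htT, hcne]) (fun _ => by simp)
            rw [this, List.append_assoc]
            rfl
          · -- letter after a letter: both lower-case
            have hprevs : prev ≠ some ' ' := fun h => hlast (hsp.mpr h)
            have hprevn : prev ≠ none := ht htT
            have hfT : f = true := hf.mpr ⟨htT, hprevs, hprevn⟩
            have hstep : pvStepA (g, t) c = (g ++ [PySem.Chars.lowerChar c], t) := by
              simp [pvStepA, hsep, halpha, htT, hlast]
            rw [List.foldl_cons, hstep, hkept, hsq, hfT]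
            have htl : pvTitle (c :: pvSqueezeGo (some c) (pvKept rest)) true
                = PySem.Chars.lowerChar c :: pvTitle (pvSqueezeGo (some c) (pvKept rest)) true := by
              simp [pvTitle, halpha]
            rw [htl]
            have := ih (g ++ [PySem.Chars.lowerChar c]) t (some c) true
              (by simp [pvLower_ne_space halpha, hcne])
              (by simp)
              (by simp [htT, hcne]) (fun _ => by simp)
            rw [this, List.append_assoc]
            rfl
      · -- character discarded by both
        have hsb : pvSep c = false := by
          simp only [pvSep, Bool.or_eq_false_iff, beq_eq_false_iff_ne]
          exact ⟨⟨fun h => hsep (Or.inl h), fun h => hsep (Or.inr (Or.inl h))⟩,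
                 fun h => hsep (Or.inr (Or.inr h))⟩
        have hab : PySem.Chars.isalpha c = false := by
          revert halpha; cases PySem.Chars.isalpha c <;> simp
        have hkept : pvKept (c :: rest) = pvKept rest := by
          simp [pvKept, hab, hsb]
        have hstep : pvStepA (g, t) c = (g, t) := by
          simp [pvStepA, hsep, hab]
        rw [List.foldl_cons, hstep, hkept]
        exact ih g t prev f hsp hnone hf ht

-- ===== VERDICT (by name: the statement is the Claim_ definition above) =====
theorem parse_handwriting_spec : Claim_equal_parse_handwriting := by
  intro recipeName _
  unfold Spec_parse_handwriting parse_handwriting parse_handwriting_alt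
  have hmain := pvMain recipeName.toList [] false none false
    (by simp) (by simp) (by simp) (fun h => by cases h)
  simp only [List.nil_append] at hmain
  simp only [pvZipSqueeze, hmain]
  rcases h : pvTitle (pvSqueezeGo none (pvKept recipeName.toList)) false with _ | ⟨a, l⟩
  · simp
  · simp
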